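-- pv_equiv track=rewrite | github.com/lidayua/uoj | Problem4/solve10.py | genxy
-- ===== SOURCE A (Python) =====
-- movex = {"D": 1, "U": -1, "L": 0, "R": 0}
--
-- movey = {"D": 0, "U": 0, "L": -1, "R": 1}
--
-- def genxy(x, y, op):
--     xs = []
--     ys = []
--     for c in op:
--         xs.append(x)
--         ys.append(y)
--         x += movex[c]
--         y += movey[c]
--     return x, y, xs, ys
-- ===== SOURCE B (Python) =====
-- movex = {"D": 1, "U": -1, "L": 0, "R": 0}
--
-- movey = {"D": 0, "U": 0, "L": -1, "R": 1}
--
-- def _scan(start, mv, op):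
--     # running-prefix scan: full position sequence (n+1 entries)
--     acc = [start]
--     for c in op:
--         acc.append(acc[-1] + mv[c])
--     return acc
--
-- def genxy(x, y, op):
--     axs = _scan(x, movex, op)
--     ays = _scan(y, movey, op)
--     return axs[-1], ays[-1], axs[:-1], ays[:-1]
-- ===== Notes on version B (the rewrite author's own statement) =====
-- stated objective: alternative
-- what changed: B replaces A's single loop carrying four pieces of state (x, y, xs, ys) by two independent prefix-sum scans per axis that build the full position sequence and then split off the last element.
import Mathlib
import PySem

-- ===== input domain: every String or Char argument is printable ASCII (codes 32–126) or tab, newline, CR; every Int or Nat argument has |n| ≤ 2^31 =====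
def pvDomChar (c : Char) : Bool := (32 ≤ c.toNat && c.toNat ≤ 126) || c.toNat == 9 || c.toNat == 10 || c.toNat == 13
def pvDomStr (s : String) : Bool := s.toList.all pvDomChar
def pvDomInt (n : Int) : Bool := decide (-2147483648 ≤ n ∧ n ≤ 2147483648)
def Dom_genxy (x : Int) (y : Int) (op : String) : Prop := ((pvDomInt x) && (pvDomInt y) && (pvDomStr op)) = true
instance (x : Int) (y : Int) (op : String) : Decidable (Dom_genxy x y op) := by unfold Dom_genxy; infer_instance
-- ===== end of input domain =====

-- B replaces A's one loop over four pieces of state by two independent per-axis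
-- prefix scans that build the full position sequences; objective: alternative decomposition.

-- shared module constants: the dicts movex / movey
def movexD : PySem.Dict Char Int := PySem.Dict.ofList [('D', 1), ('U', -1), ('L', 0), ('R', 0)]
def moveyD : PySem.Dict Char Int := PySem.Dict.ofList [('D', 0), ('U', 0), ('L', -1), ('R', 1)]

-- movex[c] raises KeyError on other chars (excluded by Pre_genxy); on Pre_ the lookup
-- succeeds, so the default 0 is never used inside the claimed domain.
def mvx (c : Char) : Int := PySem.Dict.getD movexD c 0
def mvy (c : Char) : Int := PySem.Dict.getD moveyD c 0

-- ===== PORT A =====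
def genxy (x : Int) (y : Int) (op : String) : Int × Int × List Int × List Int :=
  let st := op.toList.foldl
    (fun (s : Int × Int × List Int × List Int) c =>
      (s.1 + mvx c, s.2.1 + mvy c, s.2.2.1 ++ [s.1], s.2.2.2 ++ [s.2.1]))
    (x, y, [], [])
  -- A appends x,y BEFORE updating; rearranged here into one fold step with the same values
  (st.1, st.2.1, st.2.2.1, st.2.2.2)

-- ===== PORT B =====
-- _scan: acc = [start]; for c: acc.append(acc[-1] + mv[c])   (acc[-1] = getLast!, acc nonempty)
def bScan (start : Int) (mv : Char → Int) (op : String) : List Int :=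
  op.toList.foldl (fun acc c => acc ++ [acc.getLast! + mv c]) [start]

def genxy_alt (x : Int) (y : Int) (op : String) : Int × Int × List Int × List Int :=
  let axs := bScan x mvx op
  let ays := bScan y mvy op
  (axs.getLast!, ays.getLast!, axs.dropLast, ays.dropLast)

-- ===== PRECONDITION & SPEC =====
-- Pre_ excludes exactly the inputs on which A raises KeyError: a char of op not in the dicts.
def Pre_genxy (_x : Int) (_y : Int) (op : String) : Prop :=
  (op.toList.all (fun c => c == 'D' || c == 'U' || c == 'L' || c == 'R')) = true
instance (x : Int) (y : Int) (op : String) : Decidable (Pre_genxy x y op) := by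
  unfold Pre_genxy; infer_instance

def pvWitness_genxy : Int × Int × String := (2, -3, "DULRRD")

def Spec_genxy (x : Int) (y : Int) (op : String) (out : Int × Int × List Int × List Int) : Prop := out = genxy_alt x y op
instance (x : Int) (y : Int) (op : String) (out : Int × Int × List Int × List Int) : Decidable (Spec_genxy x y op out) := by unfold Spec_genxy; infer_instance

-- ===== CLAIM (what is proved, stated in full; the proofs are below) =====
def Claim_equal_genxy : Prop := ∀ (x : Int) (y : Int) (op : String), Dom_genxy x y op → Pre_genxy x y op → Spec_genxy x y op (genxy x y op)

-- ===== LEMMAS AND PROOFS =====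

theorem getLast!_singleton (p : Int) : ([p] : List Int).getLast! = p := by
  rw [List.getLast!_eq_getLast?_getD]; simp

theorem getLast!_append_singleton (l : List Int) (p : Int) : (l ++ [p]).getLast! = p := by
  rw [List.getLast!_eq_getLast?_getD]; simp [List.getLast?_append]

theorem getLast!_append_right (l s : List Int) (h : s ≠ []) :
    (l ++ s).getLast! = s.getLast! := by
  rw [List.getLast!_eq_getLast?_getD, List.getLast!_eq_getLast?_getD,
    List.getLast?_append_of_ne_nil l h]

theorem scan_ne_nil (cs : List Char) (mv : Char → Int) (acc : List Int) (h : acc ≠ []) :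
    cs.foldl (fun acc c => acc ++ [acc.getLast! + mv c]) acc ≠ [] := by
  induction cs generalizing acc with
  | nil => simpa using h
  | cons c cs ih => exact ih _ (by simp)

theorem scan_shift (cs : List Char) (mv : Char → Int) (l : List Int) (p : Int) :
    cs.foldl (fun acc c => acc ++ [acc.getLast! + mv c]) (l ++ [p]) =
      l ++ cs.foldl (fun acc c => acc ++ [acc.getLast! + mv c]) [p] := by
  induction cs generalizing l p with
  | nil => simp
  | cons c cs ih =>
      simp only [List.foldl_cons, getLast!_append_singleton, getLast!_singleton]
      rw [ih (l ++ [p]) (p + mv c), ih [p] (p + mv c), List.append_assoc]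

theorem main_lemma (cs : List Char) (x y : Int) (xs ys : List Int) :
    cs.foldl
      (fun (s : Int × Int × List Int × List Int) c =>
        (s.1 + mvx c, s.2.1 + mvy c, s.2.2.1 ++ [s.1], s.2.2.2 ++ [s.2.1]))
      (x, y, xs, ys) =
    ((cs.foldl (fun acc c => acc ++ [acc.getLast! + mvx c]) [x]).getLast!,
     (cs.foldl (fun acc c => acc ++ [acc.getLast! + mvy c]) [y]).getLast!,
     xs ++ (cs.foldl (fun acc c => acc ++ [acc.getLast! + mvx c]) [x]).dropLast,
     ys ++ (cs.foldl (fun acc c => acc ++ [acc.getLast! + mvy c]) [y]).dropLast) := by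
  induction cs generalizing x y xs ys with
  | nil => simp
  | cons c cs ih =>
      simp only [List.foldl_cons, getLast!_singleton]
      rw [ih, scan_shift cs mvx [x] (x + mvx c), scan_shift cs mvy [y] (y + mvy c)]
      have hnx := scan_ne_nil cs mvx [x + mvx c] (by simp)
      have hny := scan_ne_nil cs mvy [y + mvy c] (by simp)
      rw [getLast!_append_right [x] _ hnx, getLast!_append_right [y] _ hny,
        List.dropLast_append_of_ne_nil hnx, List.dropLast_append_of_ne_nil hny]
      simp

-- ===== VERDICT (by name: the statement is the Claim_ definition above) =====
theorem genxy_spec : Claim_equal_genxy := by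
  intro x y op _ _
  show _ = _
  simp only [genxy, genxy_alt, bScan]
  rw [main_lemma]
  simp
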